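-- pv_equiv track=rewrite | github.com/jtonini/nomad | tests/test_workstation_user_collectors.py | _encode_comp_t
-- ===== SOURCE A (Python) =====
-- def _encode_comp_t(value: int) -> int:
--     """Inverse of decode_comp_t. For synthesizing pacct records in tests."""
--     if value == 0:
--         return 0
--     exponent = 0
--     while value >= (1 << 13):
--         value >>= 3
--         exponent += 1
--         if exponent > 7:
--             raise ValueError("value too large for comp_t")
--     return (exponent << 13) | (value & 0x1FFF)
-- ===== SOURCE B (Python) =====
-- def _encode_comp_t(value: int) -> int:
--     """Inverse of decode_comp_t. For synthesizing pacct records in tests."""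
--     if value < (1 << 13):
--         return value & 0x1FFF
--     e = -(-(value.bit_length() - 13) // 3)
--     if e > 7:
--         raise ValueError("value too large for comp_t")
--     return (e << 13) | (value >> (3 * e))
-- ===== Notes on version B (the rewrite author's own statement) =====
-- stated objective: simpler
-- what changed: Replaced A's shift-counting while-loop with a loop-free closed form: the comp_t exponent is computed directly from value.bit_length() by ceiling division, after a single guard for values below the mantissa limit (which also covers zero and negatives via the mask).
import Mathlib
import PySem

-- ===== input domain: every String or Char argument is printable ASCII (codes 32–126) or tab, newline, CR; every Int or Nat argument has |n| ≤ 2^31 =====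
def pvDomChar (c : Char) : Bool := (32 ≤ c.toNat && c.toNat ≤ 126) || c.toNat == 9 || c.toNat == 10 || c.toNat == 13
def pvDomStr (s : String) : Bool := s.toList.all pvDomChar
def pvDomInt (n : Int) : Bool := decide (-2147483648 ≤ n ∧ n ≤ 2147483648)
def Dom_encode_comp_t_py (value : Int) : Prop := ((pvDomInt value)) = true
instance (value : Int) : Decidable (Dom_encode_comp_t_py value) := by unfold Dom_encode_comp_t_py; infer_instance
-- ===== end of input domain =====

-- B replaces A's shift-counting while-loop by a closed-form exponent computed from the bit length (simpler, no loop).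

-- ===== PORT A =====
-- A's while-loop; the `0` result is the ValueError branch ("value too large for comp_t"),
-- which is unreachable for |value| ≤ 2^31 (it needs value ≥ 2^34).
def encAloop (value : Int) (exponent : Int) : Int :=
  if 8192 ≤ value then
    if _h7 : 7 < exponent + 1 then 0
    else encAloop (value >>> (3:Nat)) (exponent + 1)
  else PySem.Int.bor (exponent <<< 13) (PySem.Int.band value 8191)
termination_by (8 - exponent).toNat
decreasing_by omega

def encode_comp_t_py (value : Int) : Int :=
  if value = 0 then 0 else encAloop value 0

-- ===== PORT B =====
def encode_comp_t_py_alt (value : Int) : Int :=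
  if value < 8192 then PySem.Int.band value 8191
  else
    let e : Int := -(PySem.Int.floordiv (-((PySem.Int.bitLength value : Int) - 13)) 3)
    if 7 < e then 0  -- ValueError branch, unreachable for |value| ≤ 2^31
    else PySem.Int.bor (e <<< 13) (value >>> (3 * e).toNat)

-- ===== PRECONDITION & SPEC =====
def Spec_encode_comp_t_py (value : Int) (out : Int) : Prop := out = encode_comp_t_py_alt value
instance (value : Int) (out : Int) : Decidable (Spec_encode_comp_t_py value out) := by unfold Spec_encode_comp_t_py; infer_instance

-- ===== CLAIM (what is proved, stated in full; the proofs are below) =====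
def Claim_equal_encode_comp_t_py : Prop := ∀ (value : Int), Dom_encode_comp_t_py value → Spec_encode_comp_t_py value (encode_comp_t_py value)

-- ===== LEMMAS AND PROOFS =====

lemma encAloop_step (v e : Int) (hv : 8192 ≤ v) (he : e + 1 ≤ 7) :
    encAloop v e = encAloop (v >>> (3:Nat)) (e + 1) := by
  rw [encAloop, if_pos hv, dif_neg (by omega : ¬ 7 < e + 1)]

lemma encAloop_exit (v e : Int) (hv : v < 8192) :
    encAloop v e = PySem.Int.bor (e <<< 13) (PySem.Int.band v 8191) := by
  rw [encAloop, if_neg (by omega : ¬ 8192 ≤ v)]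

lemma encAloop_run (k : Nat) : ∀ (v e : Int), 0 ≤ v → e + k ≤ 7 →
    (∀ i : Nat, i < k → 8192 * 8 ^ i ≤ v) → v < 8192 * 8 ^ k →
    encAloop v e = PySem.Int.bor ((e + (k : Int)) <<< 13) (PySem.Int.band (v / 2 ^ (3 * k)) 8191) := by
  induction k with
  | zero =>
    intro v e _ _ _ hhi
    simp only [pow_zero, mul_one] at hhi ⊢
    rw [encAloop_exit v e hhi]
    norm_num
  | succ k ih =>
    intro v e hv he hlo hhi
    have h0 : (8192 : Int) ≤ v := by have := hlo 0 (by omega); simpa using this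
    rw [encAloop_step v e h0 (by push_cast at he ⊢; omega)]
    rw [Int.shiftRight_eq_div_pow]
    rw [show (((2:Nat) ^ 3 : Nat) : Int) = 8 by norm_num]
    rw [ih (v / 8) (e + 1) (by positivity) (by push_cast at he ⊢; omega)
      (fun i hi => by
        have := hlo (i + 1) (by omega)
        rw [Int.le_ediv_iff_mul_le (by norm_num : (0:Int) < 8)]
        calc 8192 * 8 ^ i * 8 = 8192 * 8 ^ (i + 1) := by ring
          _ ≤ v := this)
      (by
        rw [Int.ediv_lt_iff_lt_mul (by norm_num : (0:Int) < 8)]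
        calc v < 8192 * 8 ^ (k + 1) := hhi
          _ = 8192 * 8 ^ k * 8 := by ring)]
    have he' : e + 1 + (k : Int) = e + ((k : Nat) + 1 : Nat) := by push_cast; ring
    have hd : v / 8 / 2 ^ (3 * k) = v / 2 ^ (3 * (k + 1)) := by
      rw [Int.ediv_ediv_of_nonneg (by norm_num)]
      congr 1
      rw [show (8:Int) = 2 ^ 3 by norm_num, ← pow_add]
      congr 1
      omega
    rw [he', hd]

lemma band_small (x : Int) (h0 : 0 ≤ x) (h : x < 8192) : PySem.Int.band x 8191 = x := by
  rw [PySem.Int.band_of_nonneg h0 (by norm_num)]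
  have h1 := Nat.and_two_pow_sub_one_eq_mod x.toNat 13
  norm_num at h1
  rw [show ((8191 : Int)).toNat = 8191 from rfl, h1]
  omega

lemma pow2_form (k : Nat) : (8192 : Int) * 8 ^ k = 2 ^ (13 + 3 * k) := by
  rw [show (8192:Int) = 2 ^ 13 by norm_num, show (8:Int) = 2 ^ 3 by norm_num,
    ← pow_mul, ← pow_add]

lemma range_case (k : Nat) (hk1 : 1 ≤ k) (hk7 : k ≤ 7) (v : Int)
    (hlo : 2 ^ (10 + 3 * k) ≤ v) (hhi : v < 2 ^ (13 + 3 * k)) :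
    encode_comp_t_py v = encode_comp_t_py_alt v := by
  have hvpos : (0 : Int) < v := lt_of_lt_of_le (by positivity) hlo
  have hv8192 : (8192 : Int) ≤ v := by
    calc (8192 : Int) = 2 ^ 13 := by norm_num
      _ ≤ 2 ^ (10 + 3 * k) := pow_le_pow_right₀ (by norm_num) (by omega)
      _ ≤ v := hlo
  -- A side
  have hA : encode_comp_t_py v
      = PySem.Int.bor ((k : Int) <<< 13) (v / 2 ^ (3 * k)) := by
    unfold encode_comp_t_py
    rw [if_neg (by omega)]
    rw [encAloop_run k v 0 (by omega) (by omega)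
      (fun i hi => by
        rw [pow2_form]
        calc (2:Int) ^ (13 + 3 * i) ≤ 2 ^ (10 + 3 * k) :=
              pow_le_pow_right₀ (by norm_num) (by omega)
          _ ≤ v := hlo)
      (by rw [pow2_form]; exact hhi)]
    rw [band_small _ (by positivity)
      (by
        rw [Int.ediv_lt_iff_lt_mul (by positivity)]
        calc v < 2 ^ (13 + 3 * k) := hhi
          _ = 8192 * 2 ^ (3 * k) := by
            rw [show (8192:Int) = 2 ^ 13 by norm_num, ← pow_add])]
    norm_num
  -- B side: bit length bounds
  have hvN : ((v.natAbs : Nat) : Int) = v := Int.natAbs_of_nonneg (le_of_lt hvpos)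
  have hhiN : v.natAbs < 2 ^ (13 + 3 * k) := by
    have h := hhi; rw [← hvN] at h; exact_mod_cast h
  have hloN : 2 ^ (10 + 3 * k) ≤ v.natAbs := by
    have h := hlo; rw [← hvN] at h; exact_mod_cast h
  have hbl_hi : PySem.Int.bitLength v ≤ 13 + 3 * k := by
    by_contra hc
    have h1 := PySem.Int.two_pow_bitLength_le v (by omega)
    have h2 : (2 : Nat) ^ (13 + 3 * k) ≤ 2 ^ (PySem.Int.bitLength v - 1) :=
      Nat.pow_le_pow_right (by norm_num) (by omega)
    exact absurd (lt_of_le_of_lt (le_trans h2 h1) hhiN) (lt_irrefl _)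
  have hbl_lo : 10 + 3 * k < PySem.Int.bitLength v := by
    by_contra hc
    have h1 := PySem.Int.lt_two_pow_bitLength v
    have h2 : (2 : Nat) ^ (PySem.Int.bitLength v) ≤ 2 ^ (10 + 3 * k) :=
      Nat.pow_le_pow_right (by norm_num) (by omega)
    exact absurd (lt_of_lt_of_le h1 (le_trans h2 hloN)) (lt_irrefl _)
  have hB : encode_comp_t_py_alt v
      = PySem.Int.bor ((k : Int) <<< 13) (v / 2 ^ (3 * k)) := by
    unfold encode_comp_t_py_alt
    rw [if_neg (by omega)]
    have he : -(PySem.Int.floordiv (-((PySem.Int.bitLength v : Int) - 13)) 3) = (k : Int) := by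
      rw [PySem.Int.neg_floordiv_neg_eq_iff_of_pos (by norm_num)]
      constructor <;> omega
    simp only [he]
    rw [if_neg (by exact_mod_cast by omega : ¬ (7:Int) < (k:Int))]
    congr 1
    rw [show ((3 * (k:Int)).toNat) = 3 * k by omega, Int.shiftRight_eq_div_pow]
    norm_cast
  rw [hA, hB]

-- ===== VERDICT (by name: the statement is the Claim_ definition above) =====
theorem encode_comp_t_py_spec : Claim_equal_encode_comp_t_py := by
  intro value hdom
  unfold Dom_encode_comp_t_py pvDomInt at hdom
  simp only [decide_eq_true_eq] at hdom
  unfold Spec_encode_comp_t_py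
  by_cases hz : value = 0
  · subst hz; decide
  by_cases hsmall : value < 8192
  · unfold encode_comp_t_py encode_comp_t_py_alt
    rw [if_neg hz, if_pos hsmall, encAloop_exit value 0 hsmall]
    rw [show ((0:Int) <<< 13) = 0 from rfl]
    rw [PySem.Int.bor_comm, PySem.Int.bor_zero]
  · -- 8192 ≤ value ≤ 2^31 : pick the exponent range
    rw [not_lt] at hsmall
    by_cases h1 : value < 65536
    · exact (range_case 1 (by norm_num) (by norm_num) value (by norm_num; omega) (by norm_num; omega))
    by_cases h2 : value < 524288
    · exact (range_case 2 (by norm_num) (by norm_num) value (by norm_num; omega) (by norm_num; omega))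
    by_cases h3 : value < 4194304
    · exact (range_case 3 (by norm_num) (by norm_num) value (by norm_num; omega) (by norm_num; omega))
    by_cases h4 : value < 33554432
    · exact (range_case 4 (by norm_num) (by norm_num) value (by norm_num; omega) (by norm_num; omega))
    by_cases h5 : value < 268435456
    · exact (range_case 5 (by norm_num) (by norm_num) value (by norm_num; omega) (by norm_num; omega))
    by_cases h6 : value < 2147483648
    · exact (range_case 6 (by norm_num) (by norm_num) value (by norm_num; omega) (by norm_num; omega))
    · exact (range_case 7 (by norm_num) (by norm_num) value (by norm_num; omega) (by norm_num; omega))
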